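-- pv_equiv track=rewrite | github.com/pypi-data/pypi-mirror-54 | packages/sciexp2-expdef/sciexp2-expdef-2.0.4.tar.gz/sciexp2-expdef-2.0.4/sciexp2/common/utils.py | text_realign
-- ===== SOURCE A (Python) =====
-- def text_realign(text, from_text, to_text):
--     offset = len(from_text) - len(to_text)
--     if offset > 0:
--         lines = text.split("\n")
--         text = [lines[0]] + [line[offset:]
--                              for line in lines[1:]]
--         text = "\n".join(text)
--     elif offset < 0:
--         lines = text.split("\n")
--         text = [lines[0]] + [(" " * -offset) + line
--                              for line in lines[1:]]
--         text = "\n".join(text)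
--     return text.replace(from_text, to_text, 1)
-- ===== SOURCE B (Python) =====
-- def text_realign(text, from_text, to_text):
--     offset = len(from_text) - len(to_text)
--     if offset < 0:
--         # widen: insert padding right after every newline, in one whole-string pass
--         text = text.replace("\n", "\n" + " " * -offset)
--     elif offset > 0:
--         # narrow: single character scan dropping up to `offset` chars after each newline
--         out = []
--         skip = 0
--         for ch in text:
--             if ch == "\n":
--                 skip = offset
--                 out.append(ch)
--             elif skip:
--                 skip -= 1
--             else:
--                 out.append(ch)
--         text = "".join(out)
--     return text.replace(from_text, to_text, 1)
-- ===== Notes on version B (the rewrite author's own statement) =====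
-- stated objective: alternative
-- what changed: Replaced A's split('\n') / per-line list comprehension / join pipeline with whole-string passes: widening is one str.replace inserting padding after every newline, narrowing is a single character scan with a skip counter that drops up to offset chars after each newline.
import Mathlib
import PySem

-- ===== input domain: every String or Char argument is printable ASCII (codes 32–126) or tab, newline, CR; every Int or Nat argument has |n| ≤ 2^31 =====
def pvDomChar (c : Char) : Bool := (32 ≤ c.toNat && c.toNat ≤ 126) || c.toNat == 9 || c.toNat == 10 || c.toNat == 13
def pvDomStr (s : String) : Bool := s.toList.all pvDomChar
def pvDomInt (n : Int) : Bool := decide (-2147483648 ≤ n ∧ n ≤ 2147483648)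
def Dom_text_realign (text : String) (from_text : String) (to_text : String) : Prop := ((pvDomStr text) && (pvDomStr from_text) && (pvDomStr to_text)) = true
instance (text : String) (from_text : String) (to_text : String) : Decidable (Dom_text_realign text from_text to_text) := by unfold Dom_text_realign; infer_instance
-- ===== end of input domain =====

-- B replaces A's split / per-line comprehension / join with whole-string passes (a str.replace
-- for widening, one char scan with a skip counter for narrowing): alternative algorithm, no list of lines.

-- shared exact hand port of Python's str.replace(old, new, 1) (PySem.Chars.replace has no count
-- parameter): leftmost occurrence of a non-empty old replaced once; empty old prepends new
-- (Python: "ab".replace("", "X", 1) == "Xab"). Both Pythons call this same builtin.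
def pvReplOnceGo (old new : List Char) : List Char → List Char
  | [] => []
  | c :: t => if old.isPrefixOf (c :: t) then new ++ (c :: t).drop old.length
              else c :: pvReplOnceGo old new t

def pvReplOnce (s old new : List Char) : List Char :=
  if old = [] then new ++ s else pvReplOnceGo old new s

-- ===== PORT A =====
def text_realign (text : String) (from_text : String) (to_text : String) : String :=
  let offset : Int := PySem.Str.len from_text - PySem.Str.len to_text
  let t : List Char :=
    if offset > 0 then
      let lines := PySem.Chars.splitOn text.toList ['\n']
      PySem.Chars.join ['\n']
        (lines.headI ::
          (PySem.List.slice lines (some 1) none).map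
            (fun line => PySem.Chars.slice line (some offset) none))
    else if offset < 0 then
      let lines := PySem.Chars.splitOn text.toList ['\n']
      PySem.Chars.join ['\n']
        (lines.headI ::
          (PySem.List.slice lines (some 1) none).map
            (fun line => PySem.List.pyRepeat [' '] (-offset) ++ line))
    else text.toList
  String.ofList (pvReplOnce t from_text.toList to_text.toList)

-- ===== PORT B =====
-- one step of B's character scan (the skip counter is reset to offset after each newline)
def pvScanStep (offset : Int) (st : Int × List Char) (c : Char) : Int × List Char :=
  if c = '\n' then (offset, st.2 ++ [c])
  else if st.1 ≠ 0 then (st.1 - 1, st.2)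
  else (st.1, st.2 ++ [c])

def text_realign_alt (text : String) (from_text : String) (to_text : String) : String :=
  let offset : Int := PySem.Str.len from_text - PySem.Str.len to_text
  let t : List Char :=
    if offset < 0 then
      PySem.Chars.replace text.toList ['\n'] ('\n' :: PySem.List.pyRepeat [' '] (-offset))
    else if offset > 0 then
      (text.toList.foldl (pvScanStep offset) (0, [])).2
    else text.toList
  String.ofList (pvReplOnce t from_text.toList to_text.toList)

-- ===== PRECONDITION & SPEC =====
def Spec_text_realign (text : String) (from_text : String) (to_text : String) (out : String) : Prop := out = text_realign_alt text from_text to_text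
instance (text : String) (from_text : String) (to_text : String) (out : String) : Decidable (Spec_text_realign text from_text to_text out) := by unfold Spec_text_realign; infer_instance

-- ===== CLAIM (what is proved, stated in full; the proofs are below) =====
def Claim_equal_text_realign : Prop := ∀ (text : String) (from_text : String) (to_text : String), Dom_text_realign text from_text to_text → Spec_text_realign text from_text to_text (text_realign text from_text to_text)

-- ===== LEMMAS AND PROOFS =====
def pvSplitAux : List Char → List Char → List (List Char)
  | [], cur => [cur.reverse]
  | c :: t, cur => if c = '\n' then cur.reverse :: pvSplitAux t [] else pvSplitAux t (c :: cur)

theorem pvSplitOn_go_spec (fuel : Nat) (l cur : List Char) (acc : List (List Char))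
    (h : l.length < fuel) :
    PySem.Chars.splitOn.go ['\n'] fuel l cur acc = acc.reverse ++ pvSplitAux l cur := by
  induction fuel generalizing l cur acc with
  | zero => omega
  | succ f ih =>
    cases l with
    | nil => simp [PySem.Chars.splitOn.go, pvSplitAux]
    | cons c t =>
      by_cases hc : c = '\n'
      · subst hc
        rw [PySem.Chars.splitOn.go]
        simp only [List.isPrefixOf, List.length_cons] at *
        rw [if_pos (by simp)]
        rw [show List.drop (List.length ([]:List Char) + 1) ('\n' :: t) = t from rfl]
        rw [ih t [] _ (by simp at h; omega)]
        simp [pvSplitAux]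
      · rw [PySem.Chars.splitOn.go]
        rw [if_neg (by simp [List.isPrefixOf]; exact fun hh => hc hh.symm)]
        rw [ih t (c :: cur) acc (by simp at h ⊢; omega)]
        simp [pvSplitAux, hc]

theorem pvSplitOn_eq (s : List Char) :
    PySem.Chars.splitOn s ['\n'] = pvSplitAux s [] := by
  rw [PySem.Chars.splitOn, pvSplitOn_go_spec _ _ _ _ (by omega)]
  simp

theorem pvSplitAux_ne_nil (s cur : List Char) : pvSplitAux s cur ≠ [] := by
  induction s generalizing cur with
  | nil => simp [pvSplitAux]
  | cons c t ih => by_cases hc : c = '\n' <;> simp [pvSplitAux, hc] <;> exact ih _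

theorem pvSplitAux_cur (s cur : List Char) :
    pvSplitAux s cur = (cur.reverse ++ (pvSplitAux s []).headI) :: (pvSplitAux s []).tail := by
  induction s generalizing cur with
  | nil => simp [pvSplitAux]
  | cons c t ih =>
    by_cases hc : c = '\n'
    · simp [pvSplitAux, hc]
    · rw [pvSplitAux, if_neg hc, ih (c :: cur)]
      conv_rhs => rw [pvSplitAux, if_neg hc, ih [c]]
      simp

def pvRepAux (pad : List Char) : List Char → List Char
  | [] => []
  | c :: t => if c = '\n' then '\n' :: pad ++ pvRepAux pad t else c :: pvRepAux pad t

theorem pvReplace_go_spec (pad : List Char) (fuel : Nat) (l acc : List Char)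
    (h : l.length ≤ fuel) :
    PySem.Chars.replace.go ['\n'] ('\n' :: pad) fuel l acc
      = acc.reverse ++ pvRepAux pad l := by
  induction fuel generalizing l acc with
  | zero =>
    interval_cases hl : l.length
    · rw [List.length_eq_zero_iff] at hl; subst hl
      simp [PySem.Chars.replace.go, pvRepAux]
  | succ f ih =>
    cases l with
    | nil => simp [PySem.Chars.replace.go, pvRepAux]
    | cons c t =>
      by_cases hc : c = '\n'
      · subst hc
        rw [PySem.Chars.replace.go, if_pos (by simp)]
        rw [show List.drop (List.length (['\n'])) ('\n' :: t) = t from rfl]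
        rw [ih t _ (by simp at h; omega)]
        simp [pvRepAux]
      · rw [PySem.Chars.replace.go,
          if_neg (by simp [List.isPrefixOf]; exact fun hh => hc hh.symm)]
        rw [ih t (c :: acc) (by simp at h ⊢; omega)]
        simp [pvRepAux, hc]

theorem pvReplace_eq (pad s : List Char) :
    PySem.Chars.replace s ['\n'] ('\n' :: pad) = pvRepAux pad s := by
  rw [PySem.Chars.replace, if_neg (by simp), pvReplace_go_spec _ _ _ _ (le_refl _)]
  simp

theorem pvJoin_cons_head (c : Char) (h0 : List Char) (rest : List (List Char)) :
    PySem.Chars.join ['\n'] ((c :: h0) :: rest) = c :: PySem.Chars.join ['\n'] (h0 :: rest) := by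
  cases rest with
  | nil => simp [PySem.Chars.join_singleton]
  | cons q r => rw [PySem.Chars.join_cons_cons, PySem.Chars.join_cons_cons]; simp

theorem pvJoin_append_head (a h0 : List Char) (rest : List (List Char)) :
    PySem.Chars.join ['\n'] ((a ++ h0) :: rest) = a ++ PySem.Chars.join ['\n'] (h0 :: rest) := by
  induction a with
  | nil => simp
  | cons c a' ih => rw [List.cons_append, pvJoin_cons_head, ih]; rfl

theorem pvNegCase (pad s : List Char) :
    PySem.Chars.join ['\n']
      ((pvSplitAux s []).headI :: (pvSplitAux s []).tail.map (fun line => pad ++ line))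
      = pvRepAux pad s := by
  induction s with
  | nil => simp [pvSplitAux, pvRepAux, PySem.Chars.join_singleton]
  | cons c t ih =>
    obtain ⟨l0, ls, hls⟩ : ∃ l0 ls, pvSplitAux t [] = l0 :: ls := by
      cases h : pvSplitAux t [] with
      | nil => exact absurd h (pvSplitAux_ne_nil t [])
      | cons a b => exact ⟨a, b, rfl⟩
    by_cases hc : c = '\n'
    · subst hc
      rw [pvSplitAux, if_pos rfl, pvRepAux]
      simp only [List.headI, List.tail, hls, List.map_cons]
      rw [PySem.Chars.join_cons_cons]
      rw [hls] at ih; simp only [List.headI, List.tail] at ih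
      rw [pvJoin_append_head, ih]
      simp
    · rw [pvSplitAux, if_neg hc, pvSplitAux_cur t [c], pvRepAux, if_neg hc]
      rw [hls] at ih ⊢
      simp only [List.headI, List.tail, List.reverse_cons, List.reverse_nil,
        List.nil_append, List.cons_append] at ih ⊢
      rw [pvJoin_cons_head, ih]

def pvSkipAux (off : Nat) : Nat → List Char → List Char
  | _, [] => []
  | k, c :: t => if c = '\n' then '\n' :: pvSkipAux off off t
                 else match k with
                      | 0 => c :: pvSkipAux off 0 t
                      | k' + 1 => pvSkipAux off k' t

theorem pvPosCase (off : Nat) (s : List Char) : ∀ k,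
    PySem.Chars.join ['\n']
      (((pvSplitAux s []).headI.drop k) :: (pvSplitAux s []).tail.map (List.drop off))
      = pvSkipAux off k s := by
  induction s with
  | nil => intro k; simp [pvSplitAux, pvSkipAux, PySem.Chars.join_singleton]
  | cons c t ih =>
    intro k
    obtain ⟨l0, ls, hls⟩ : ∃ l0 ls, pvSplitAux t [] = l0 :: ls := by
      cases h : pvSplitAux t [] with
      | nil => exact absurd h (pvSplitAux_ne_nil t [])
      | cons a b => exact ⟨a, b, rfl⟩
    by_cases hc : c = '\n'
    · subst hc
      rw [pvSplitAux, if_pos rfl,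
        show pvSkipAux off k ('\n' :: t) = '\n' :: pvSkipAux off off t from by simp [pvSkipAux]]
      simp only [List.headI, List.tail, hls, List.map_cons]
      have hi := ih off
      rw [hls] at hi; simp only [List.headI, List.tail] at hi
      rw [PySem.Chars.join_cons_cons, ← hi]
      simp
    · rw [pvSplitAux, if_neg hc, pvSplitAux_cur t [c]]
      rw [hls]
      simp only [List.headI, List.tail, List.reverse_cons, List.reverse_nil,
        List.nil_append, List.cons_append]
      cases k with
      | zero =>
        rw [show pvSkipAux off 0 (c :: t) = c :: pvSkipAux off 0 t from by simp [pvSkipAux, hc]]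
        rw [List.drop_zero, pvJoin_cons_head]
        have hi := ih 0
        rw [hls] at hi; simp only [List.headI, List.tail, List.drop_zero] at hi
        rw [hi]
      | succ k' =>
        rw [show pvSkipAux off (k' + 1) (c :: t) = pvSkipAux off k' t from by simp [pvSkipAux, hc]]
        rw [show List.drop (k' + 1) (c :: l0) = List.drop k' l0 from rfl]
        have hi := ih k'
        rw [hls] at hi; simp only [List.headI, List.tail] at hi
        rw [hi]

theorem pvFoldl_scan (off : Int) (hoff : 0 < off) (l : List Char) : ∀ (k : Int), 0 ≤ k →
    ∀ (out : List Char),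
    (l.foldl (pvScanStep off) (k, out)).2 = out ++ pvSkipAux off.toNat k.toNat l := by
  induction l with
  | nil => intro k hk out; simp [pvSkipAux]
  | cons c t ih =>
    intro k hk out
    by_cases hc : c = '\n'
    · subst hc
      rw [List.foldl_cons, show pvScanStep off (k, out) '\n' = (off, out ++ ['\n']) from by
        simp [pvScanStep]]
      rw [ih off (le_of_lt hoff) (out ++ ['\n'])]
      rw [show pvSkipAux off.toNat k.toNat ('\n' :: t) = '\n' :: pvSkipAux off.toNat off.toNat t
        from by simp [pvSkipAux]]
      simp
    · by_cases hk0 : k = 0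
      · subst hk0
        rw [List.foldl_cons, show pvScanStep off (0, out) c = (0, out ++ [c]) from by
          simp [pvScanStep, hc]]
        rw [ih 0 le_rfl (out ++ [c])]
        rw [show pvSkipAux off.toNat (Int.toNat 0) (c :: t) = c :: pvSkipAux off.toNat 0 t
          from by simp [pvSkipAux, hc]]
        simp
      · rw [List.foldl_cons, show pvScanStep off (k, out) c = (k - 1, out) from by
          simp [pvScanStep, hc, hk0]]
        rw [ih (k - 1) (by omega) out]
        have hkpos : 0 < k := lt_of_le_of_ne hk (Ne.symm hk0)
        have : k.toNat = (k - 1).toNat + 1 := by omega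
        rw [show pvSkipAux off.toNat k.toNat (c :: t) = pvSkipAux off.toNat (k - 1).toNat t
          from by rw [this]; simp [pvSkipAux, hc]]

theorem text_realign_main (text from_text to_text : String) :
    text_realign text from_text to_text = text_realign_alt text from_text to_text := by
  unfold text_realign text_realign_alt
  set off : Int := PySem.Str.len from_text - PySem.Str.len to_text with hoffdef
  simp only []
  refine congrArg (fun l => String.ofList (pvReplOnce l from_text.toList to_text.toList)) ?_
  rcases lt_trichotomy off 0 with h | h | h
  · rw [if_neg (by omega), if_pos h, if_pos h]
    rw [pvSplitOn_eq, PySem.List.slice_from_one, pvReplace_eq,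
      PySem.List.pyRepeat_singleton]
    exact pvNegCase _ _
  · rw [if_neg (by omega), if_neg (by omega), if_neg (by omega), if_neg (by omega)]
  · rw [if_pos h, if_neg (by omega), if_pos h]
    rw [pvSplitOn_eq, PySem.List.slice_from_one]
    have hmap : ∀ (ls : List (List Char)),
        ls.map (fun line => PySem.Chars.slice line (some off) none)
          = ls.map (List.drop off.toNat) := by
      intro ls
      apply List.map_congr_left
      intro line _
      rw [PySem.Chars.slice_eq_listSlice, PySem.List.slice_from line (le_of_lt h)]
    rw [hmap, pvFoldl_scan off h text.toList 0 le_rfl []]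
    have := pvPosCase off.toNat text.toList 0
    rw [List.drop_zero] at this
    rw [this]
    simp

-- ===== VERDICT (by name: the statement is the Claim_ definition above) =====
theorem text_realign_spec : Claim_equal_text_realign := by
  intro text from_text to_text _
  exact text_realign_main text from_text to_text
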